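-- pv_equiv track=rewrite | github.com/JosephSigma991/intelligenceops-demo | pages/10_Network_Overview.py | delta_mode
-- ===== SOURCE A (Python) =====
-- def delta_mode(label: str) -> str:
--     l = str(label or "").lower()
--     if "otp" in l:
--         return "normal"
--     if "flights" in l:
--         return "normal"
--     if any(tok in l for tok in ["avg", "delay", "minutes", "min"]):
--         return "inverse"
--     return "off"
-- ===== SOURCE B (Python) =====
-- KEYWORDS = [("otp", 0), ("flights", 0), ("avg", 1), ("delay", 1), ("minutes", 1), ("min", 1)]
-- MODES = ["normal", "inverse", "off"]
--
-- def delta_mode(label: str) -> str: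
--     l = str(label or "").lower()
--     best = 2
--     for i in range(len(l)):
--         for kw, prio in KEYWORDS:
--             if prio < best and l.startswith(kw, i):
--                 best = prio
--     return MODES[best]
-- ===== Notes on version B (the rewrite author's own statement) =====
-- stated objective: alternative
-- what changed: Instead of A's staged substring-membership if-chain, B makes a single left-to-right scan of the lowered string, at each position checking which keyword starts there and keeping the minimum priority matched, then indexes a mode table with that priority.
import Mathlib
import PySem

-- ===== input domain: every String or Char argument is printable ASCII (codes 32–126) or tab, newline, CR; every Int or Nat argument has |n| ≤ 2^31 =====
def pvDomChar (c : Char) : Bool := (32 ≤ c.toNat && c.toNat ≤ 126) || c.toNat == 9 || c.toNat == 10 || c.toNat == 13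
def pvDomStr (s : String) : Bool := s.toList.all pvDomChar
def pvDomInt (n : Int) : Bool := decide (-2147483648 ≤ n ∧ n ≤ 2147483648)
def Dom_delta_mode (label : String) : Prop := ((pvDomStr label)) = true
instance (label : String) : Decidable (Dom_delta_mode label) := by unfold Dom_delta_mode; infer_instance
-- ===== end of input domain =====

-- B replaces A's staged substring-membership if-chain by a single left-to-right scan that keeps the minimum priority of any keyword starting at each position (alternative; same cost).


-- ===== PORT A =====
def delta_mode (label : String) : String :=
  let l := PySem.Str.lower (if label = "" then "" else label)
  if PySem.Str.isIn "otp" l then "normal"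
  else if PySem.Str.isIn "flights" l then "normal"
  else if ["avg", "delay", "minutes", "min"].any (fun tok => PySem.Str.isIn tok l) then "inverse"
  else "off"

-- ===== PORT B =====
def pvKeywords : List (List Char × Nat) :=
  [("otp".toList, 0), ("flights".toList, 0), ("avg".toList, 1),
   ("delay".toList, 1), ("minutes".toList, 1), ("min".toList, 1)]

def pvModes : List String := ["normal", "inverse", "off"]

-- l.startswith(kw, i) for 0 ≤ i ≤ len(l) is exactly: kw is a prefix of l with its first i characters dropped
def delta_mode_alt (label : String) : String :=
  let l := (PySem.Str.lower (if label = "" then "" else label)).toList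
  let best := (List.range l.length).foldl
    (fun best i =>
      pvKeywords.foldl
        (fun b kp => if kp.2 < b && kp.1.isPrefixOf (l.drop i) then kp.2 else b) best) 2
  pvModes.getD best "off"

-- ===== PRECONDITION & SPEC =====
def Spec_delta_mode (label : String) (out : String) : Prop := out = delta_mode_alt label
instance (label : String) (out : String) : Decidable (Spec_delta_mode label out) := by unfold Spec_delta_mode; infer_instance

-- ===== CLAIM (what is proved, stated in full; the proofs are below) =====
def Claim_equal_delta_mode : Prop := ∀ (label : String), Dom_delta_mode label → Spec_delta_mode label (delta_mode label)

-- ===== LEMMAS AND PROOFS =====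

-- the position-wise priority: 0 if a "normal" keyword starts at i, 1 if an "inverse" one does, else 2
def pvM (L : List Char) (i : Nat) : Nat :=
  if "otp".toList.isPrefixOf (L.drop i) || "flights".toList.isPrefixOf (L.drop i) then 0
  else if "avg".toList.isPrefixOf (L.drop i) || "delay".toList.isPrefixOf (L.drop i)
        || "minutes".toList.isPrefixOf (L.drop i) || "min".toList.isPrefixOf (L.drop i) then 1
  else 2

theorem pv_inner_aux (p1 p2 p3 p4 p5 p6 : Bool) (b : Nat) (hb : b ≤ 2) :
    ([(p1, 0), (p2, 0), (p3, 1), (p4, 1), (p5, 1), (p6, 1)] : List (Bool × Nat)).foldl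
      (fun b kp => if kp.2 < b && kp.1 then kp.2 else b) b
      = min b (if p1 || p2 then 0 else if p3 || p4 || p5 || p6 then 1 else 2) := by
  cases p1 <;> cases p2 <;> cases p3 <;> cases p4 <;> cases p5 <;> cases p6 <;>
    (first
      | (simp [List.foldl_cons, List.foldl_nil] <;> omega)
      | (simp [List.foldl_cons, List.foldl_nil]; split_ifs <;> omega))

theorem pv_inner_eq (L : List Char) (i : Nat) (b : Nat) (hb : b ≤ 2) :
    pvKeywords.foldl
      (fun b kp => if kp.2 < b && kp.1.isPrefixOf (L.drop i) then kp.2 else b) b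
      = min b (pvM L i) := by
  have h := pv_inner_aux ("otp".toList.isPrefixOf (L.drop i))
    ("flights".toList.isPrefixOf (L.drop i)) ("avg".toList.isPrefixOf (L.drop i))
    ("delay".toList.isPrefixOf (L.drop i)) ("minutes".toList.isPrefixOf (L.drop i))
    ("min".toList.isPrefixOf (L.drop i)) b hb
  simp only [List.foldl] at h
  simp only [pvKeywords, List.foldl, pvM]
  exact h

theorem pv_fold_eq (L : List Char) : ∀ (xs : List Nat) (b : Nat), b ≤ 2 →
    xs.foldl (fun best i => pvKeywords.foldl
      (fun b kp => if kp.2 < b && kp.1.isPrefixOf (L.drop i) then kp.2 else b) best) b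
    = xs.foldl (fun b j => min b (pvM L j)) b := by
  intro xs
  induction xs with
  | nil => intro _ _; rfl
  | cons x xs ih =>
    intro b hb
    simp only [List.foldl_cons]
    rw [pv_inner_eq L x b hb]
    exact ih _ (le_trans (Nat.min_le_left _ _) hb)

theorem pvM_eq (L : List Char) (i : Nat) : pvM L i =
    if ("otp".toList <+: L.drop i ∨ "flights".toList <+: L.drop i) then 0
    else if ("avg".toList <+: L.drop i ∨ "delay".toList <+: L.drop i
          ∨ "minutes".toList <+: L.drop i ∨ "min".toList <+: L.drop i) then 1
    else 2 := by
  simp only [pvM, Bool.or_eq_true, List.isPrefixOf_iff_prefix, or_assoc]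

theorem pv_foldl_min_le_init (m : Nat → Nat) : ∀ (xs : List Nat) (init : Nat),
    xs.foldl (fun b j => min b (m j)) init ≤ init := by
  intro xs
  induction xs with
  | nil => intro init; simp
  | cons x xs ih =>
    intro init
    simp only [List.foldl_cons]
    exact le_trans (ih _) (Nat.min_le_left _ _)

theorem pv_foldl_min_le_of_mem (m : Nat → Nat) : ∀ (xs : List Nat) (init i : Nat), i ∈ xs →
    xs.foldl (fun b j => min b (m j)) init ≤ m i := by
  intro xs
  induction xs with
  | nil => intro _ _ h; cases h
  | cons x xs ih =>
    intro init i h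
    simp only [List.foldl_cons]
    rcases List.mem_cons.mp h with rfl | h
    · exact le_trans (pv_foldl_min_le_init m xs _) (Nat.min_le_right _ _)
    · exact ih _ _ h

theorem pv_foldl_min_cases (m : Nat → Nat) : ∀ (xs : List Nat) (init : Nat),
    xs.foldl (fun b j => min b (m j)) init = init ∨
      ∃ i ∈ xs, xs.foldl (fun b j => min b (m j)) init = m i := by
  intro xs
  induction xs with
  | nil => intro _; exact Or.inl rfl
  | cons x xs ih =>
    intro init
    simp only [List.foldl_cons]
    rcases ih (min init (m x)) with h | ⟨i, hi, h⟩
    · rcases le_total init (m x) with hle | hle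
      · exact Or.inl (by rw [h]; exact Nat.min_eq_left hle)
      · exact Or.inr ⟨x, by simp, by rw [h]; exact Nat.min_eq_right hle⟩
    · exact Or.inr ⟨i, by simp [hi], h⟩

theorem pv_prefix_pos_lt (kw : List Char) (L : List Char) (j : Nat)
    (hkw : kw ≠ []) (h : kw <+: L.drop j) : j < L.length := by
  by_contra hj
  rw [List.drop_eq_nil_of_le (le_of_not_gt hj)] at h
  exact hkw (List.prefix_nil.mp h)

-- ===== VERDICT (by name: the statement is the Claim_ definition above) =====
theorem delta_mode_spec : Claim_equal_delta_mode := by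
  intro label _
  unfold Spec_delta_mode delta_mode delta_mode_alt
  simp only [PySem.Str.isIn_eq, List.any_cons, List.any_nil, Bool.or_false]
  set s := PySem.Str.lower (if label = "" then "" else label) with hs
  set L := s.toList with hL
  rw [pv_fold_eq L (List.range L.length) 2 (by omega)]
  have hcases := pv_foldl_min_cases (pvM L) (List.range L.length) 2
  have hle := pv_foldl_min_le_of_mem (pvM L) (List.range L.length) 2
  set r := (List.range L.length).foldl (fun b j => min b (pvM L j)) 2 with hr
  have occ : ∀ kw : List Char, kw ≠ [] → PySem.Chars.isIn kw L = true →
      ∃ i ∈ List.range L.length, kw <+: L.drop i := by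
    intro kw hne hin
    obtain ⟨j, hj⟩ := (PySem.Chars.exists_prefix_drop_iff_isIn kw L).mpr hin
    exact ⟨j, List.mem_range.mpr (pv_prefix_pos_lt kw L j hne hj), hj⟩
  have noocc : ∀ kw : List Char, PySem.Chars.isIn kw L = false → ∀ i, ¬ kw <+: L.drop i := by
    intro kw hin i hp
    have h := (PySem.Chars.exists_prefix_drop_iff_isIn kw L).mp ⟨i, hp⟩
    rw [hin] at h
    cases h
  by_cases h1 : PySem.Chars.isIn "otp".toList L = true
  · obtain ⟨i, hi, hp⟩ := occ _ (by decide) h1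
    have hm : pvM L i = 0 := by rw [pvM_eq]; exact if_pos (Or.inl hp)
    have hr0 : r = 0 := Nat.le_zero.mp (hm ▸ hle i hi)
    rw [if_pos h1, hr0]
    rfl
  · by_cases h2 : PySem.Chars.isIn "flights".toList L = true
    · obtain ⟨i, hi, hp⟩ := occ _ (by decide) h2
      have hm : pvM L i = 0 := by rw [pvM_eq]; exact if_pos (Or.inr hp)
      have hr0 : r = 0 := Nat.le_zero.mp (hm ▸ hle i hi)
      rw [if_neg h1, if_pos h2, hr0]
      rfl
    · have h1' := eq_false_of_ne_true h1
      have h2' := eq_false_of_ne_true h2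
      have hno0 : ∀ i, pvM L i ≠ 0 := by
        intro i h0
        rw [pvM_eq] at h0
        by_cases hA : ("otp".toList <+: L.drop i ∨ "flights".toList <+: L.drop i)
        · rcases hA with hp | hp
          · exact noocc _ h1' i hp
          · exact noocc _ h2' i hp
        · rw [if_neg hA] at h0
          split_ifs at h0
      have hrne0 : r ≠ 0 := by
        intro h0
        rcases hcases with h | ⟨i, _, h⟩
        · omega
        · exact hno0 i (h ▸ h0)
      by_cases h3 : (PySem.Chars.isIn "avg".toList L || (PySem.Chars.isIn "delay".toList L
          || (PySem.Chars.isIn "minutes".toList L || PySem.Chars.isIn "min".toList L))) = true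
      · have hm1 : ∃ i ∈ List.range L.length, pvM L i ≤ 1 := by
          simp only [Bool.or_eq_true] at h3
          rcases h3 with h | h | h | h
          · obtain ⟨i, hi, hp⟩ := occ _ (by decide) h
            refine ⟨i, hi, ?_⟩
            rw [pvM_eq]; split_ifs with hA hB
            · omega
            · omega
            · exact absurd (Or.inl hp) hB
          · obtain ⟨i, hi, hp⟩ := occ _ (by decide) h
            refine ⟨i, hi, ?_⟩
            rw [pvM_eq]; split_ifs with hA hB
            · omega
            · omega
            · exact absurd (Or.inr (Or.inl hp)) hB
          · obtain ⟨i, hi, hp⟩ := occ _ (by decide) h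
            refine ⟨i, hi, ?_⟩
            rw [pvM_eq]; split_ifs with hA hB
            · omega
            · omega
            · exact absurd (Or.inr (Or.inr (Or.inl hp))) hB
          · obtain ⟨i, hi, hp⟩ := occ _ (by decide) h
            refine ⟨i, hi, ?_⟩
            rw [pvM_eq]; split_ifs with hA hB
            · omega
            · omega
            · exact absurd (Or.inr (Or.inr (Or.inr hp))) hB
        obtain ⟨i, hi, hm⟩ := hm1
        have hler := hle i hi
        have hr1 : r = 1 := by omega
        rw [if_neg h1, if_neg h2, if_pos h3, hr1]
        rfl
      · have h3' := eq_false_of_ne_true h3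
        simp only [Bool.or_eq_false_iff] at h3'
        obtain ⟨ha', hd', hmi', hm'⟩ := h3'
        have hall2 : ∀ i, pvM L i = 2 := by
          intro i
          rw [pvM_eq]
          split_ifs with hA hB
          · exfalso
            rcases hA with hp | hp
            · exact noocc _ h1' i hp
            · exact noocc _ h2' i hp
          · exfalso
            rcases hB with hp | hp | hp | hp
            · exact noocc _ ha' i hp
            · exact noocc _ hd' i hp
            · exact noocc _ hmi' i hp
            · exact noocc _ hm' i hp
          · rfl
        have hr2 : r = 2 := by
          rcases hcases with h | ⟨i, _, h⟩
          · exact h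
          · rw [h]; exact hall2 i
        rw [if_neg h1, if_neg h2, if_neg h3, hr2]
        rfl
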